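-- pv_equiv track=rewrite | github.com/koteitan/repeated-maze | maze/minsky-doubling/analyze-minsky-doubling-steps.py | compute_path_length
-- ===== SOURCE A (Python) =====
-- def compute_path_length(k):
--     """Exact path length for k-fold y ↦ 2y+1 doubling (undirected maze).
--
--     y_0 = 1, y_{i+1} = 2*y_i + 1 = 2^{i+2} - 1
--
--     Per cycle:  10*y_i + 2
--       Phase 1 (doubling): 4*y_i - 1
--       ny + bridge: 2
--       Phase 2 (transfer): 6*y_i + 1
--     Drain: 2*y_k + 1
--     """
--     y = [0] * (k + 1)
--     y[0] = 1
--     for i in range(1, k + 1):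
--         y[i] = 1 + 2 * y[i - 1]
--
--     total = 0
--     for i in range(k):
--         total += 10 * y[i] + 2
--
--     total += 2 * y[k] + 1
--     return total, y[k]
-- ===== SOURCE B (Python) =====
-- def compute_path_length(k):
--     """Closed form: y_i = 2^(i+1) - 1, so the loop sums telescope to
--     total = 12*2^(k+1) - 8*k - 21 and y_k = p - 1 where p = 2^(k+1)."""
--     p = 2 ** (k + 1)
--     return 12 * p - 8 * k - 21, p - 1
-- ===== Notes on version B (the rewrite author's own statement) =====
-- stated objective: faster
-- what changed: Replaced the array-building recurrence loop and the summation loop by the closed form total = 12*2^(k+1) - 8k - 21, y_k = 2^(k+1) - 1 (one big-int power instead of k list updates and k additions).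
import Mathlib
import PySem

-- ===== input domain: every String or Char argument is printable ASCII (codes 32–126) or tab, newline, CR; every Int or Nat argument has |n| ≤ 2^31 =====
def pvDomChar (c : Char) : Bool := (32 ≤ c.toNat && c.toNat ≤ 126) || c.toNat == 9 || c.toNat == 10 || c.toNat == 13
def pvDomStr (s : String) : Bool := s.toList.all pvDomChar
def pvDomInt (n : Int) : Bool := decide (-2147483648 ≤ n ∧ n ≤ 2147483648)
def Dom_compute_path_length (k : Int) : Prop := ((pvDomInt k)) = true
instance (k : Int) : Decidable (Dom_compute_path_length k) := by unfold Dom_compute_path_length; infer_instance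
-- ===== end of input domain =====

-- B replaces A's two loops by the closed form 12*2^(k+1) - 8k - 21 / 2^(k+1) - 1 (objective: faster).

-- ===== PORT A =====
-- literal transliteration: y = [0]*(k+1); y[0] = 1; fill loop; summation loop; drain
def compute_path_length (k : Int) : Int × Int :=
  let y : List Int := List.replicate (k + 1).toNat 0
  let y := PySem.List.pySetD y 0 1
  let y := (PySem.List.pyRange 1 (k + 1) 1).foldl
    (fun y i => PySem.List.pySetD y i (1 + 2 * PySem.List.pyGetD y (i - 1) 0)) y
  let total : Int := 0
  let total := (PySem.List.pyRange 0 k 1).foldl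
    (fun total i => total + (10 * PySem.List.pyGetD y i 0 + 2)) total
  let total := total + (2 * PySem.List.pyGetD y k 0 + 1)
  (total, PySem.List.pyGetD y k 0)

-- ===== PORT B =====
def compute_path_length_alt (k : Int) : Int × Int :=
  let p : Int := 2 ^ (k + 1).toNat
  (12 * p - 8 * k - 21, p - 1)

-- ===== PRECONDITION & SPEC =====
-- Python A raises IndexError for k < 0 (y = [0]*(k+1) is too short for y[0] = 1).
def Pre_compute_path_length (k : Int) : Prop := 0 ≤ k
instance (k : Int) : Decidable (Pre_compute_path_length k) := by unfold Pre_compute_path_length; infer_instance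
def pvWitness_compute_path_length : Int := 3

def Spec_compute_path_length (k : Int) (out : Int × Int) : Prop := out = compute_path_length_alt k
instance (k : Int) (out : Int × Int) : Decidable (Spec_compute_path_length k out) := by unfold Spec_compute_path_length; infer_instance

-- ===== CLAIM (what is proved, stated in full; the proofs are below) =====
def Claim_equal_compute_path_length : Prop := ∀ (k : Int), Dom_compute_path_length k → Pre_compute_path_length k → Spec_compute_path_length k (compute_path_length k)

-- ===== LEMMAS AND PROOFS =====

-- the filled array: y[i] = 2^(i+1) - 1
def pvF (i : Nat) : Int := 2 ^ (i + 1) - 1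

-- after processing range(1, m+1) of the fill loop (m ≤ n), the first m+1 slots hold pvF
theorem pv_fill (n m : Nat) (hm : m ≤ n) :
    (PySem.List.pyRange 1 ((m : Int) + 1) 1).foldl
      (fun y i => PySem.List.pySetD y i (1 + 2 * PySem.List.pyGetD y (i - 1) 0))
      (PySem.List.pySetD (List.replicate (n + 1) (0 : Int)) 0 1)
    = (List.range (m + 1)).map pvF ++ List.replicate (n - m) 0 := by
  induction m with
  | zero =>
    rw [PySem.List.pyRange_one_eq_nil (by norm_num)]
    simp [PySem.List.pySetD_of_nonneg, List.replicate_succ, pvF]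
  | succ m ih =>
    have h1 : ((m : Int) + 1) ≤ ((m + 1 : Nat) : Int) + 1 := by push_cast; omega
    have hsplit : PySem.List.pyRange 1 (((m + 1 : Nat) : Int) + 1) 1
        = PySem.List.pyRange 1 ((m : Int) + 1) 1 ++ [(m : Int) + 1] := by
      have h2 : ((m + 1 : Nat) : Int) + 1 = ((m : Int) + 1) + 1 := by push_cast; ring
      rw [h2]
      exact PySem.List.pyRange_one_succ_right (by omega)
    rw [hsplit, List.foldl_append, ih (by omega)]
    have hlenA : ((List.range (m + 1)).map pvF).length = m + 1 := by simp
    have hget : PySem.List.pyGetD ((List.range (m + 1)).map pvF ++ List.replicate (n - m) (0:Int)) ((m : Int) + 1 - 1) 0 = pvF m := by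
      have : ((m : Int) + 1 - 1) = ((m : Nat) : Int) := by ring
      rw [this, PySem.List.pyGetD_natCast]
      rw [List.getD_append _ _ _ _ (by simp)]
      simp [List.getD_eq_getElem?_getD]
    simp only [List.foldl_cons, List.foldl_nil, hget]
    have hset : PySem.List.pySetD ((List.range (m + 1)).map pvF ++ List.replicate (n - m) (0:Int)) ((m : Int) + 1) (1 + 2 * pvF m)
        = (List.range (m + 1)).map pvF ++ (List.replicate (n - m) (0:Int)).set 0 (1 + 2 * pvF m) := by
      have h2 : ((m : Int) + 1) = (((m + 1 : Nat)) : Int) := by push_cast; ring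
      rw [h2, PySem.List.pySetD_natCast]
      rw [List.set_append]
      simp [hlenA]
    rw [hset]
    have hnm : n - m = (n - (m+1)) + 1 := by omega
    rw [hnm, List.replicate_succ]
    have : (1 + 2 * pvF m) = pvF (m + 1) := by simp [pvF]; ring
    rw [this]
    simp [List.range_succ]


theorem pv_sum (n : Nat) :
    (PySem.List.pyRange 0 (n : Int) 1).foldl
      (fun total i => total + (10 * PySem.List.pyGetD ((List.range (n + 1)).map pvF) i 0 + 2)) 0
    = 10 * 2 ^ (n + 1) - 20 - 8 * (n : Int) := by
  have key : ∀ m : Nat, m ≤ n →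
      (PySem.List.pyRange 0 (m : Int) 1).foldl
        (fun total i => total + (10 * PySem.List.pyGetD ((List.range (n + 1)).map pvF) i 0 + 2)) 0
      = 10 * 2 ^ (m + 1) - 20 - 8 * (m : Int) := by
    intro m
    induction m with
    | zero => intro _; rw [PySem.List.pyRange_one_eq_nil (by norm_num)]; norm_num
    | succ m ih =>
      intro hm
      have hsplit : PySem.List.pyRange 0 ((m + 1 : Nat) : Int) 1
          = PySem.List.pyRange 0 ((m : Int)) 1 ++ [(m : Int)] := by
        have h2 : ((m + 1 : Nat) : Int) = ((m : Int)) + 1 := by push_cast; ring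
        rw [h2]
        exact PySem.List.pyRange_one_succ_right (by omega)
      rw [hsplit, List.foldl_append, ih (by omega)]
      have hget : PySem.List.pyGetD ((List.range (n + 1)).map pvF) ((m : Int)) 0 = pvF m := by
        rw [PySem.List.pyGetD_natCast]
        simp only [List.getD_eq_getElem?_getD, List.getElem?_map]
        rw [List.getElem?_range (by omega : m < n + 1)]; rfl
      simp only [List.foldl_cons, List.foldl_nil, hget]
      simp [pvF]
      ring
  exact key n (le_refl n)

-- ===== VERDICT (by name: the statement is the Claim_ definition above) =====
theorem compute_path_length_spec : Claim_equal_compute_path_length := by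
  intro k _ hp
  unfold Spec_compute_path_length
  obtain ⟨n, rfl⟩ := Int.eq_ofNat_of_zero_le hp
  unfold compute_path_length compute_path_length_alt
  have ht : ((n : Int) + 1).toNat = n + 1 := by omega
  simp only [ht]
  rw [pv_fill n n (le_refl n)]
  simp only [Nat.sub_self, List.replicate_zero, List.append_nil]
  have hget : PySem.List.pyGetD ((List.range (n + 1)).map pvF) ((n : Int)) 0 = pvF n := by
    rw [PySem.List.pyGetD_natCast]
    simp [List.getD_eq_getElem?_getD]
  rw [hget, pv_sum n]
  simp only [pvF, Prod.mk.injEq, and_true]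
  ring
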